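-- pv_equiv track=rewrite | github.com/mbokulic/bmt_parser | bmt_parser/collaborators.py | _unique_collaborators
-- ===== SOURCE A (Python) =====
-- import itertools
--
-- def _unique_collaborators(authors):
--     '''
--     returns a list of strings like "author1||author2"
--     '''
--     # first I need to separate multiple authors
--     separated = []
--     for string in authors:
--         target = string.split('||')
--         separated.extend(target)
--     # then create a Cartesian product of the authors and remove duplicates
--     # and authorA-authorA combinations
--     product = list(itertools.product(separated, repeat=2))
--     product = ['||'.join(sorted(collabs)) for collabs in product
--                if collabs[0] != collabs[1]]
--     product = list(set(product))
--     return product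
-- ===== SOURCE B (Python) =====
-- import itertools
--
-- def _unique_collaborators(authors):
--     '''
--     returns a list of strings like "author1||author2"
--     '''
--     # dedup-first: the distinct authors, then each unordered pair exactly once
--     unique = dict.fromkeys(a for s in authors for a in s.split('||'))
--     pairs = ('||'.join(sorted(p)) for p in itertools.combinations(unique, 2))
--     return list(dict.fromkeys(pairs))
-- ===== Notes on version B (the rewrite author's own statement) =====
-- stated objective: alternative
-- what changed: Instead of materialising the full n×n Cartesian product of the raw (non-deduplicated) author list, filtering self-pairs and deduplicating the quadratic key list at the end, B deduplicates the authors first and enumerates each unordered pair exactly once via itertools.combinations over the distinct authors, deduplicating only the rare '||'-collision keys.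
import Mathlib
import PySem

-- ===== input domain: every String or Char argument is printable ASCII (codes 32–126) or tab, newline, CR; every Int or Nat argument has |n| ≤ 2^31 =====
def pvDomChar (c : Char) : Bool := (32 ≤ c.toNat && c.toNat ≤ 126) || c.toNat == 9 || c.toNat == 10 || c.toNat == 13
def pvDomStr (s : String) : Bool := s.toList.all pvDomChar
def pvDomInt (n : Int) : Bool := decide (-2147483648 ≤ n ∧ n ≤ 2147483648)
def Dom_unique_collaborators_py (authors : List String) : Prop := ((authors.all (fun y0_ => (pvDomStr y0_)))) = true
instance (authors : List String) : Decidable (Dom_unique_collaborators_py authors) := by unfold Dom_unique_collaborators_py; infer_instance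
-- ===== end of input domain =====

-- B deduplicates the authors first and enumerates each unordered pair once via combinations,
-- instead of A's full Cartesian product over the raw author list deduplicated at the end.
-- (Python's list(set(...)) iteration order is not modelled; outputs are compared as sets,
-- both ports keep first occurrences in order.)

-- ===== PORT A =====
-- s.split('||'); the separator "||" is a nonempty literal, so split? is always `some` (exact)
def pvSplit (s : String) : List String := (PySem.Str.split? s "||").getD []

def unique_collaborators_py (authors : List String) : List String :=
  -- separated = []; for string in authors: separated.extend(string.split('||'))
  let separated := authors.foldl (fun acc s => acc ++ pvSplit s) []
  -- product = list(itertools.product(separated, repeat=2))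
  let product := separated.flatMap (fun x => separated.map (fun y => (x, y)))
  -- product = ['||'.join(sorted(collabs)) for collabs in product if collabs[0] != collabs[1]]
  let keys := (product.filter (fun c => c.1 != c.2)).map
      (fun c => PySem.Str.join "||" (PySem.List.sorted [c.1, c.2] (fun s => s)))
  -- product = list(set(product))
  PySem.Set.ofList keys

-- ===== PORT B =====
def unique_collaborators_py_alt (authors : List String) : List String :=
  -- unique = dict.fromkeys(a for s in authors for a in s.split('||'))
  let unique := PySem.List.dedup (authors.flatMap pvSplit)
  -- pairs = ('||'.join(sorted(p)) for p in itertools.combinations(unique, 2))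
  let pairs := (PySem.List.combinations unique 2).map
      (fun p => PySem.Str.join "||" (PySem.List.sorted p (fun s => s)))
  -- return list(dict.fromkeys(pairs))
  PySem.List.dedup pairs

-- ===== PRECONDITION & SPEC =====
def Spec_unique_collaborators_py (authors : List String) (out : List String) : Prop := out = unique_collaborators_py_alt authors
instance (authors : List String) (out : List String) : Decidable (Spec_unique_collaborators_py authors out) := by unfold Spec_unique_collaborators_py; infer_instance

-- ===== CLAIM (what is proved, stated in full; the proofs are below) =====
def Claim_equal_unique_collaborators_py : Prop := ∀ (authors : List String), Dom_unique_collaborators_py authors → Spec_unique_collaborators_py authors (unique_collaborators_py authors)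

-- ===== LEMMAS AND PROOFS =====

-- the pair key '||'.join(sorted([x, y]))
def pvKey (x y : String) : String := PySem.Str.join "||" (PySem.List.sorted [x, y] (fun s => s))

-- the keys A's row for author a contributes, over base list l
def pvRow (l : List String) (a : String) : List String :=
  (l.filter (fun b => a != b)).map (pvKey a)

-- the keys B builds from a deduplicated author list u
def pvCombKeys (u : List String) : List String :=
  (PySem.List.combinations u 2).map (fun p => PySem.Str.join "||" (PySem.List.sorted p (fun s => s)))

-- first occurrences of L not already in seen, in order (the "new output" of ordered dedup)
def pvRes (seen : List String) : List String → List String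
  | [] => []
  | a :: l => if a ∈ seen then pvRes seen l else a :: pvRes (a :: seen) l

lemma pvRes_ext {s₁ s₂ : List String} (L : List String) (h : ∀ y, y ∈ s₁ ↔ y ∈ s₂) :
    pvRes s₁ L = pvRes s₂ L := by
  induction L generalizing s₁ s₂ with
  | nil => rfl
  | cons a l ih =>
    simp only [pvRes]
    by_cases ha : a ∈ s₁
    · rw [if_pos ha, if_pos ((h a).1 ha)]; exact ih h
    · rw [if_neg ha, if_neg (fun hc => ha ((h a).2 hc))]
      refine congrArg _ (ih ?_)
      intro y; simp only [List.mem_cons]; exact or_congr Iff.rfl (h y)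

lemma pvRes_cons_seen {x : String} {L : List String} (s : List String) (hx : x ∉ L) :
    pvRes (x :: s) L = pvRes s L := by
  induction L generalizing s with
  | nil => rfl
  | cons a l ih =>
    have hax : a ≠ x := fun h => hx (h ▸ List.mem_cons_self ..)
    have hl : x ∉ l := fun h => hx (List.mem_cons_of_mem _ h)
    simp only [pvRes, List.mem_cons, hax, false_or]
    by_cases ha : a ∈ s
    · rw [if_pos ha, if_pos ha, ih _ hl]
    · rw [if_neg ha, if_neg ha]
      refine congrArg _ ?_
      rw [pvRes_ext (s₂ := x :: a :: s) _ (by intro y; simp; tauto), ih _ hl]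

lemma foldl_add_eq_res (L : List String) (acc : List String) :
    L.foldl PySem.Set.add acc = acc ++ pvRes acc L := by
  induction L generalizing acc with
  | nil => simp [pvRes]
  | cons a l ih =>
    simp only [List.foldl_cons, pvRes, PySem.Set.add, PySem.Set.contains]
    by_cases ha : a ∈ acc
    · rw [if_pos (by simpa using ha), if_pos ha, ih]
    · rw [if_neg (by simpa using ha), if_neg ha, ih]
      rw [pvRes_ext (s₂ := a :: acc) _ (by intro y; simp; tauto)]
      simp

lemma pvRes_append (s L₁ L₂ : List String) :
    pvRes s (L₁ ++ L₂) = pvRes s L₁ ++ pvRes (L₁ ++ s) L₂ := by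
  induction L₁ generalizing s with
  | nil => simp [pvRes]
  | cons a l ih =>
    simp only [List.cons_append, pvRes]
    by_cases ha : a ∈ s
    · rw [if_pos ha, if_pos ha, ih]
      refine congrArg _ (pvRes_ext _ ?_)
      intro y; simp only [List.mem_cons, List.mem_append]
      constructor
      · tauto
      · rintro (rfl | h | h)
        exacts [Or.inr ha, Or.inl h, Or.inr h]
    · rw [if_neg ha, if_neg ha, ih, List.cons_append]
      refine congrArg _ (congrArg _ (pvRes_ext _ ?_))
      intro y; simp only [List.mem_cons, List.mem_append]; tauto

lemma pvRes_eq_nil {s L : List String} (h : ∀ a ∈ L, a ∈ s) : pvRes s L = [] := by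
  induction L with
  | nil => rfl
  | cons a l ih =>
    simp only [pvRes, if_pos (h a (List.mem_cons_self ..))]
    exact ih fun x hx => h x (List.mem_cons_of_mem _ hx)

lemma pvRes_filter_map {s : List String} {p : String → Bool} (f : String → String)
    (L : List String) (h : ∀ x ∈ L, p x = false → f x ∈ s) :
    pvRes s ((L.filter p).map f) = pvRes s (L.map f) := by
  induction L generalizing s with
  | nil => rfl
  | cons a l ih =>
    by_cases hp : p a
    · simp only [List.filter_cons, hp, if_pos, List.map_cons, pvRes]
      by_cases hf : f a ∈ s
      · rw [if_pos hf, if_pos hf]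
        exact ih fun x hx hpx => h x (List.mem_cons_of_mem _ hx) hpx
      · rw [if_neg hf, if_neg hf]
        refine congrArg _ (ih ?_)
        intro x hx hpx
        exact List.mem_cons_of_mem _ (h x (List.mem_cons_of_mem _ hx) hpx)
    · have hpa : p a = false := by simpa using hp
      simp only [List.filter_cons, hpa, List.map_cons, pvRes,
        if_pos (h a (List.mem_cons_self ..) hpa), Bool.false_eq_true]
      exact ih fun x hx hpx => h x (List.mem_cons_of_mem _ hx) hpx

lemma pvRes_filter {s : List String} {p : String → Bool}
    (L : List String) (h : ∀ x ∈ L, p x = false → x ∈ s) :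
    pvRes s (L.filter p) = pvRes s L := by
  have := pvRes_filter_map (p := p) (s := s) (fun x => x) L h
  simpa using this

lemma pvRes_filter_comm (p : String → Bool) (L s : List String) :
    pvRes s (L.filter p) = (pvRes s L).filter p := by
  induction L generalizing s with
  | nil => rfl
  | cons a l ih =>
    by_cases hp : p a
    · by_cases ha : a ∈ s
      · simp only [List.filter_cons, hp, if_true, pvRes, ha]
        exact ih _
      · simp only [List.filter_cons, hp, if_true, pvRes, ha, ite_false]
        exact congrArg _ (ih _)
    · have hpa : p a = false := by simpa using hp
      by_cases ha : a ∈ s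
      · simp only [List.filter_cons, hpa, Bool.false_eq_true, ite_false, pvRes, ha, ite_true]
        exact ih _
      · simp only [List.filter_cons, hpa, Bool.false_eq_true, ite_false, pvRes, ha]
        have hnotin : a ∉ l.filter p := fun hc => by
          have := List.of_mem_filter hc; rw [hpa] at this; exact Bool.false_ne_true this
        rw [← pvRes_cons_seen s hnotin, ih (a :: s)]

lemma dedup_eq_res (L : List String) : PySem.List.dedup L = pvRes [] L := by
  rw [PySem.List.dedup_eq_ofList, PySem.Set.ofList_eq_foldl, foldl_add_eq_res,
    List.nil_append]

lemma dedup_cons (a : String) (m : List String) :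
    PySem.List.dedup (a :: m) = a :: PySem.List.dedup (m.filter (fun b => a != b)) := by
  rw [dedup_eq_res, dedup_eq_res]
  simp only [pvRes, List.not_mem_nil, if_false]
  refine congrArg _ ?_
  rw [← pvRes_filter (p := fun b => a != b) (s := [a]) m
      (by intro x hx hpx; simp at hpx; simp [hpx])]
  rw [pvRes_ext (s₂ := a :: []) _ (by intro y; simp)]
  rw [pvRes_cons_seen]
  intro hc
  have := List.of_mem_filter hc
  simp at this

lemma pvKey_comm (x y : String) : pvKey x y = pvKey y x := by
  unfold pvKey
  refine congrArg _ ?_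
  exact PySem.List.sorted_eq_sorted_of_perm _ _ _ (fun a b h => h) (List.Perm.swap ..)

lemma pvRes_map_dedup (f : String → String) :
    ∀ (n : Nat) (m : List String), m.length ≤ n → ∀ (s : List String),
      pvRes s ((PySem.List.dedup m).map f) = pvRes s (m.map f) := by
  intro n
  induction n with
  | zero =>
    intro m hm s
    rw [List.length_eq_zero_iff.1 (Nat.le_zero.1 hm)]
    rfl
  | succ n ih =>
    intro m hm s
    match m with
    | [] => rfl
    | a :: m' =>
      rw [dedup_cons]
      simp only [List.map_cons, pvRes]
      have hlen : (m'.filter (fun b => a != b)).length ≤ n := by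
        have h1 := List.length_filter_le (fun b => a != b) m'
        have h2 : m'.length ≤ n := by simpa using hm
        omega
      by_cases hf : f a ∈ s
      · rw [if_pos hf, if_pos hf, ih _ hlen,
          pvRes_filter_map f m' (by intro x hx hpx; simp at hpx; rwa [hpx] at hf)]
      · rw [if_neg hf, if_neg hf, ih _ hlen,
          pvRes_filter_map f m' (by intro x hx hpx; simp at hpx; simp [hpx])]

lemma pvCombKeys_cons (x : String) (u : List String) :
    pvCombKeys (x :: u) = u.map (pvKey x) ++ pvCombKeys u := by
  unfold pvCombKeys
  rw [PySem.List.combinations_cons_succ, PySem.List.combinations_one]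
  simp only [List.map_append, List.map_map]
  rfl

-- drop the keys pairing with x from the rows: they are already seen
lemma pvRows_drop (x : String) (rest : List String) :
    ∀ (l : List String) (s : List String), (∀ a ∈ l, a ∈ rest) →
      (∀ a ∈ rest, a ≠ x → pvKey a x ∈ s) →
      pvRes s (l.flatMap (pvRow (x :: rest))) = pvRes s (l.flatMap (pvRow rest)) := by
  intro l
  induction l with
  | nil => intro s _ _; rfl
  | cons a l ih =>
    intro s hl hs
    have harest : a ∈ rest := hl a (List.mem_cons_self ..)
    have hltail : ∀ b ∈ l, b ∈ rest := fun b hb => hl b (List.mem_cons_of_mem _ hb)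
    simp only [List.flatMap_cons]
    rw [pvRes_append, pvRes_append]
    by_cases hax : a = x
    · subst hax
      have hrow : pvRow (a :: rest) a = pvRow rest a := by
        unfold pvRow
        rw [List.filter_cons]
        simp
      rw [hrow]
      refine congrArg _ (ih _ hltail ?_)
      intro b hb hbx
      exact List.mem_append_right _ (hs b hb hbx)
    · have hrow : pvRow (x :: rest) a = pvKey a x :: pvRow rest a := by
        unfold pvRow
        rw [List.filter_cons]
        simp [bne_iff_ne, hax]
      have hkey : pvKey a x ∈ s := hs a harest hax
      rw [hrow]
      have hhead : pvRes s (pvKey a x :: pvRow rest a) = pvRes s (pvRow rest a) := by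
        simp only [pvRes, if_pos hkey]
      rw [hhead]
      refine congrArg _ ?_
      rw [pvRes_ext (s₂ := pvRow rest a ++ s) _ ?_]
      · exact ih _ hltail fun b hb hbx => List.mem_append_right _ (hs b hb hbx)
      · intro y
        simp only [List.cons_append, List.mem_cons, List.mem_append]
        constructor
        · rintro (rfl | h | h)
          exacts [Or.inr hkey, Or.inl h, Or.inr h]
        · tauto

-- remove x from a deduplicated author list: all its pair keys are already seen
lemma pvCombKeys_filter (x : String) :
    ∀ (v : List String) (s : List String), v.Nodup →
      (∀ c ∈ v, c ≠ x → pvKey x c ∈ s ∧ pvKey c x ∈ s) →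
      pvRes s (pvCombKeys v) = pvRes s (pvCombKeys (v.filter (fun b => x != b))) := by
  intro v
  induction v with
  | nil => intro s _ _; rfl
  | cons c v' ih =>
    intro s hnd hs
    have hnd' : v'.Nodup := hnd.of_cons
    rw [pvCombKeys_cons, pvRes_append]
    by_cases hcx : c = x
    · subst hcx
      have hxv : c ∉ v' := (List.nodup_cons.1 hnd).1
      have hfil : (c :: v').filter (fun b => c != b) = v' := by
        rw [List.filter_cons]
        simp only [bne_self_eq_false, Bool.false_eq_true, if_false]
        exact List.filter_eq_self.2 fun b hb => by
          simp [bne_iff_ne]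
          exact fun h => hxv (h ▸ hb)
      rw [hfil]
      have h1 : pvRes s (v'.map (pvKey c)) = [] := by
        refine pvRes_eq_nil fun y hy => ?_
        rcases List.mem_map.1 hy with ⟨b, hb, rfl⟩
        have hbx : b ≠ c := fun h => hxv (h ▸ hb)
        exact (hs b (List.mem_cons_of_mem _ hb) hbx).1
      rw [h1, List.nil_append]
      rw [pvRes_ext (s₂ := s) _ ?_]
      · intro y
        simp only [List.mem_append]
        constructor
        · rintro (hy | hy)
          · rcases List.mem_map.1 hy with ⟨b, hb, rfl⟩
            exact (hs b (List.mem_cons_of_mem _ hb) fun h => hxv (h ▸ hb)).1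
          · exact hy
        · exact Or.inr
    · have hfil : (c :: v').filter (fun b => x != b) = c :: v'.filter (fun b => x != b) := by
        rw [List.filter_cons]
        simp [bne_iff_ne, Ne.symm hcx]
      rw [hfil, pvCombKeys_cons, pvRes_append]
      have hckx : pvKey c x ∈ s := (hs c (List.mem_cons_self ..) hcx).2
      have hhead : pvRes s ((v'.filter (fun b => x != b)).map (pvKey c)) = pvRes s (v'.map (pvKey c)) := by
        refine pvRes_filter_map _ _ fun b hb hpb => ?_
        have hbx : x = b := by simpa [bne_iff_ne] using hpb
        subst hbx
        exact hckx
      rw [hhead]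
      refine congrArg _ ?_
      rw [pvRes_ext (s₂ := (v'.filter (fun b => x != b)).map (pvKey c) ++ s) _ ?_]
      · exact ih _ hnd' fun b hb hbx =>
          ⟨List.mem_append_right _ (hs b (List.mem_cons_of_mem _ hb) hbx).1,
           List.mem_append_right _ (hs b (List.mem_cons_of_mem _ hb) hbx).2⟩
      · intro y
        simp only [List.mem_append, List.mem_map, List.mem_filter]
        constructor
        · rintro (⟨b, hb, rfl⟩ | hy)
          · by_cases hbx : b = x
            · subst hbx; exact Or.inr hckx
            · exact Or.inl ⟨b, ⟨hb, by simpa [bne_iff_ne] using Ne.symm hbx⟩, rfl⟩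
          · exact Or.inr hy
        · rintro (⟨b, ⟨hb, _⟩, rfl⟩ | hy)
          · exact Or.inl ⟨b, hb, rfl⟩
          · exact Or.inr hy

-- MAIN: A's deduped product keys = B's deduped combination keys, over any seen
lemma pvMain : ∀ (sep : List String) (s : List String),
    pvRes s (sep.flatMap (pvRow sep)) = pvRes s (pvCombKeys (PySem.List.dedup sep)) := by
  intro sep
  induction sep with
  | nil =>
    intro s
    simp [pvCombKeys, PySem.List.dedup, PySem.Set.ofList, PySem.List.combinations_nil_succ]
  | cons x rest ih =>
    intro s
    have hmemdedup : ∀ (L : List String) (c : String), c ∈ PySem.List.dedup L ↔ c ∈ L := by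
      intro L c; rw [PySem.List.dedup_eq_ofList]; exact PySem.Set.mem_ofList _ _
    have hkeymem : ∀ a ∈ rest, a ≠ x →
        pvKey x a ∈ (rest.filter (fun b => x != b)).map (pvKey x) := by
      intro a ha hax
      exact List.mem_map.2 ⟨a, List.mem_filter.2 ⟨ha, by simpa [bne_iff_ne] using Ne.symm hax⟩, rfl⟩
    have hrow0 : pvRow (x :: rest) x = (rest.filter (fun b => x != b)).map (pvKey x) := by
      unfold pvRow
      rw [List.filter_cons]
      simp
    -- left side
    rw [List.flatMap_cons, pvRes_append, hrow0]
    rw [pvRows_drop x rest rest _ (fun a ha => ha)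
        (fun a ha hax => List.mem_append_left _ (pvKey_comm a x ▸ hkeymem a ha hax))]
    rw [ih ((rest.filter (fun b => x != b)).map (pvKey x) ++ s)]
    rw [pvCombKeys_filter x (PySem.List.dedup rest) _
        (by rw [PySem.List.dedup_eq_ofList]; exact PySem.Set.nodup_ofList _)
        (fun c hc hcx =>
          ⟨List.mem_append_left _ (hkeymem c ((hmemdedup rest c).1 hc) hcx),
           List.mem_append_left _ (pvKey_comm c x ▸ hkeymem c ((hmemdedup rest c).1 hc) hcx)⟩)]
    have hK2 : (PySem.List.dedup rest).filter (fun b => x != b)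
        = PySem.List.dedup (rest.filter (fun b => x != b)) := by
      rw [dedup_eq_res, dedup_eq_res, pvRes_filter_comm]
    rw [hK2]
    -- right side
    rw [dedup_cons, pvCombKeys_cons, pvRes_append]
    rw [pvRes_map_dedup (pvKey x) (rest.filter (fun b => x != b)).length
        (rest.filter (fun b => x != b)) le_rfl s]
    refine congrArg _ (pvRes_ext _ ?_)
    intro y
    simp only [List.mem_append, List.mem_map, hmemdedup]

-- reshape A's filtered product comprehension into rows
lemma pvProd_rows (sep : List String) :
    ((sep.flatMap (fun x => sep.map (fun y => (x, y)))).filter (fun c => c.1 != c.2)).map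
        (fun c => PySem.Str.join "||" (PySem.List.sorted [c.1, c.2] (fun s => s)))
      = sep.flatMap (pvRow sep) := by
  suffices h : ∀ l : List String,
      ((l.flatMap (fun x => sep.map (fun y => (x, y)))).filter (fun c => c.1 != c.2)).map
        (fun c => PySem.Str.join "||" (PySem.List.sorted [c.1, c.2] (fun s => s)))
      = l.flatMap (pvRow sep) from h sep
  intro l
  induction l with
  | nil => rfl
  | cons a l ih =>
    simp only [List.flatMap_cons, List.filter_append, List.map_append]
    rw [ih]
    refine congrArg (· ++ _) ?_
    rw [List.filter_map, List.map_map]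
    rfl

-- ===== VERDICT (by name: the statement is the Claim_ definition above) =====
theorem unique_collaborators_py_spec : Claim_equal_unique_collaborators_py := by
  intro authors _
  show _ = _
  unfold unique_collaborators_py unique_collaborators_py_alt
  simp only [PySem.List.foldl_append_eq_flatMap, List.nil_append]
  rw [PySem.Set.ofList_eq_foldl, foldl_add_eq_res, List.nil_append, pvProd_rows,
    dedup_eq_res (L := (PySem.List.combinations _ 2).map _)]
  exact pvMain _ []
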